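-- pv_equiv track=rewrite | github.com/VisionistInc/advent-of-code-2018 | ct-00/08/Aoc08-02.py | nodeGetValue
-- ===== SOURCE A (Python) =====
-- def nodeGetValue(node):
--     childrenCount = node[0]
--     metaDataLen = node[1]
--
--     nodeValue = 0
--     curIndex = 2
--
--     if childrenCount > 0:
--         childValues = [0] * childrenCount
--
--         for i in range(childrenCount):
--             curChildLen, curChildValue = nodeGetValue(node[curIndex:])
--             curIndex += curChildLen
--             childValues[i] = curChildValue
--
--         for metaDataElement in node[curIndex:curIndex+metaDataLen]:
--             if metaDataElement <= childrenCount: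
--                 nodeValue += childValues[metaDataElement - 1]
--     else:
--         nodeValue = sum(node[curIndex:curIndex+metaDataLen])
--
--     curIndex += metaDataLen
--
--     return curIndex, nodeValue
-- ===== SOURCE B (Python) =====
-- def nodeGetValue(node):
--     # Iterative explicit-stack state machine: a single left-to-right pass over the
--     # shared list with one index pointer; no recursion, no per-child list slices.
--     pos = 0
--     stack = []   # frames: (childrenCount, metaDataLen, childValues collected so far)
--     val = None   # None: next step reads a node header; otherwise a finished subtree's value
--     while True:
--         if val is None:
--             c, n = node[pos], node[pos + 1]
--             pos += 2
--             if c > 0: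
--                 stack.append((c, n, []))
--             else:
--                 val = sum(node[pos:pos + n])
--                 pos += n
--         elif not stack:
--             return pos, val
--         else:
--             c, n, vals = stack[-1]
--             vals.append(val)
--             if len(vals) < c:
--                 val = None
--             else:
--                 stack.pop()
--                 meta = node[pos:pos + n]
--                 pos += n
--                 val = sum(vals[m - 1] for m in meta if m <= c)
-- ===== Notes on version B (the rewrite author's own statement) =====
-- stated objective: alternative
-- what changed: B replaces A's recursion on copied list slices (node[curIndex:] for every child) by an iterative explicit-stack state machine: a single left-to-right pass over the shared list with an index pointer and a stack of (childCount, metaLen, childValues) frames. …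
-- outside the precondition, e.g. on nodeGetValue([1, 1, 0, -3, 7, 1]): A returns (2, 7), B returns (2, 0); on nodeGetValue([1, 0, 0, -3, 7]): A returns (1, 0), B returns (1, 0)
import Mathlib
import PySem

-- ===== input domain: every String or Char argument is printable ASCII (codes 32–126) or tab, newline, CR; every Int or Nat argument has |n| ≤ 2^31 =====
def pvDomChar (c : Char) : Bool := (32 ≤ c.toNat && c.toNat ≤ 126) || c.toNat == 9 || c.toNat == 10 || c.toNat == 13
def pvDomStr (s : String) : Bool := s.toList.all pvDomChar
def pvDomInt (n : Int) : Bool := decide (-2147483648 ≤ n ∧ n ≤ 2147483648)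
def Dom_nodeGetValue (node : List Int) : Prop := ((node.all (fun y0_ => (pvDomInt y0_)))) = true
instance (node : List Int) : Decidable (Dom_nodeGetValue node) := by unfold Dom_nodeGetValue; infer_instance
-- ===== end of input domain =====

-- B replaces A's slice-per-child recursion by an iterative explicit-stack state machine
-- over the shared list with one index pointer (objective: alternative).

-- ===== PORT A =====
-- A recurses on node[curIndex:]; nodeGetValueLoopA is the `for i in range(childrenCount)`
-- loop (childValues built in child order, as A's childValues[i] = curChildValue does).
-- Fuel only makes the recursion total; inside Pre_ it never runs out.
mutual
def nodeGetValueGoA : Nat → List Int → Int × Int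
  | 0, _ => (0, 0)
  | f+1, node =>
    let childrenCount := (PySem.List.pyGet? node 0).getD 0
    let metaDataLen := (PySem.List.pyGet? node 1).getD 0
    if 0 < childrenCount then
      let r := nodeGetValueLoopA f childrenCount.toNat node 2 []
      let nodeValue :=
        (PySem.List.slice node (some r.1) (some (r.1 + metaDataLen))).foldl
          (fun acc m => if m ≤ childrenCount then
              acc + (PySem.List.pyGet? r.2 (m - 1)).getD 0 else acc) 0
      (r.1 + metaDataLen, nodeValue)
    else
      (2 + metaDataLen,
       (PySem.List.slice node (some 2) (some (2 + metaDataLen))).foldl (· + ·) 0)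
  termination_by f _ => (f, 0)
def nodeGetValueLoopA : Nat → Nat → List Int → Int → List Int → Int × List Int
  | _, 0, _, curIndex, childValues => (curIndex, childValues)
  | f, k+1, node, curIndex, childValues =>
    let r := nodeGetValueGoA f (PySem.List.slice node (some curIndex) none)
    nodeGetValueLoopA f k node (curIndex + r.1) (childValues ++ [r.2])
  termination_by f k _ _ _ => (f, k+1)
end

def nodeGetValue (node : List Int) : Int × Int := nodeGetValueGoA (node.length + 1) node

-- ===== PORT B =====
-- B is a while-True state machine over (pos, val?, stack): val = none means "read the
-- next node header"; val = some v means "deliver the finished subtree's value v to the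
-- top stack frame (or return if the stack is empty)".  One step of the Python loop:
def nodeStepB (node : List Int) :
    Int × Option Int × List (Int × Int × List Int) →
      Sum (Int × Option Int × List (Int × Int × List Int)) (Int × Int)
  | (pos, none, stack) =>
    let c := (PySem.List.pyGet? node pos).getD 0
    let n := (PySem.List.pyGet? node (pos + 1)).getD 0
    if 0 < c then Sum.inl (pos + 2, none, (c, n, []) :: stack)
    else
      Sum.inl (pos + 2 + n,
        some ((PySem.List.slice node (some (pos + 2)) (some (pos + 2 + n))).foldl (· + ·) 0),
        stack)
  | (pos, some v, []) => Sum.inr (pos, v)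
  | (pos, some v, (c, n, vals) :: rest) =>
    let vals' := vals ++ [v]
    if (vals'.length : Int) < c then Sum.inl (pos, none, (c, n, vals') :: rest)
    else
      Sum.inl (pos + n,
        some ((((PySem.List.slice node (some pos) (some (pos + n))).filter
            (fun m => decide (m ≤ c))).map
            (fun m => (PySem.List.pyGet? vals' (m - 1)).getD 0)).foldl (· + ·) 0),
        rest)

-- the while-True loop, with fuel making it total (ample inside Pre_)
def nodeRunB (node : List Int) :
    Nat → Int × Option Int × List (Int × Int × List Int) → Int × Int
  | 0, (pos, _, _) => (pos, 0)
  | f+1, cfg =>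
    match nodeStepB node cfg with
    | Sum.inr r => r
    | Sum.inl cfg' => nodeRunB node f cfg'

def nodeGetValue_alt (node : List Int) : Int × Int :=
  nodeRunB node ((node.length + 2) ^ (node.length + 1)) (0, none, [])

-- ===== PRECONDITION & SPEC =====
-- Well-formedness parser for the serialized tree (it computes no output values):
-- every visited node must have its two header elements present, a nonnegative metadata
-- count, and (when it has children) only metadata references > -childrenCount.
-- structural recursion on the fuel (a depth bound; node.length + 1 always suffices),
-- so that Pre_ is kernel-decidable; the children loop is an iterated Option.bind.
def nodeGetValueParseN : Nat → List Int → Int → Option Int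
  | 0, _, _ => none
  | f+1, node, i =>
    (PySem.List.pyGet? node i).bind (fun c =>
    (PySem.List.pyGet? node (i + 1)).bind (fun n =>
      if -2 ≤ n ∨ i = 0 then
        if 0 < c then
          if c ≤ (node.length : Int) then
            ((fun acc => acc.bind (nodeGetValueParseN f node))^[c.toNat] (some (i + 2))).bind
              (fun j =>
                if (PySem.List.slice node (some j) (some (j + n))).all
                     (fun m => decide (-c < m))
                then some (j + n) else none)
          else none
        else some (i + 2 + n)
      else none))

-- Pre_ excludes inputs where A raises IndexError (missing header elements, or a metadata
-- reference ≤ -childrenCount) and inputs where a node below the top level has a metadata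
-- count ≤ -3, on which Python's negative slice end is relative to A's copied sublist but
-- to the whole shared list in B; a node may not declare more children than the whole list
-- has elements (no well-formed serialization can).
def Pre_nodeGetValue (node : List Int) : Prop :=
  (nodeGetValueParseN (node.length + 1) node 0).isSome = true
instance (node : List Int) : Decidable (Pre_nodeGetValue node) := by
  unfold Pre_nodeGetValue; infer_instance

def pvWitness_nodeGetValue : List Int := [1, 2, 0, 1, 5, 1, 2]

def Spec_nodeGetValue (node : List Int) (out : Int × Int) : Prop := out = nodeGetValue_alt node
instance (node : List Int) (out : Int × Int) : Decidable (Spec_nodeGetValue node out) := by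
  unfold Spec_nodeGetValue; infer_instance

-- ===== CLAIM (what is proved, stated in full; the proofs are below) =====
def Claim_equal_nodeGetValue : Prop :=
  ∀ (node : List Int), Dom_nodeGetValue node → Pre_nodeGetValue node →
    Spec_nodeGetValue node (nodeGetValue node)

-- ===== LEMMAS AND PROOFS =====

-- k-step iteration of B's machine, for stating "configuration c1 reaches c2 in k steps"
def nodeIterB (node : List Int) :
    Nat → Int × Option Int × List (Int × Int × List Int) →
      Sum (Int × Option Int × List (Int × Int × List Int)) (Int × Int)
  | 0, c => Sum.inl c
  | k+1, c =>
    match nodeStepB node c with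
    | Sum.inl c' => nodeIterB node k c'
    | Sum.inr r => Sum.inr r

theorem pv_iter_trans (node : List Int) (k1 k2 : Nat)
    (c1 c2 c3 : Int × Option Int × List (Int × Int × List Int))
    (h1 : nodeIterB node k1 c1 = Sum.inl c2) (h2 : nodeIterB node k2 c2 = Sum.inl c3) :
    nodeIterB node (k1 + k2) c1 = Sum.inl c3 := by
  induction k1 generalizing c1 with
  | zero =>
    simp only [nodeIterB, Sum.inl.injEq] at h1
    subst h1; simpa using h2
  | succ k ih =>
    rw [Nat.succ_add]
    simp only [nodeIterB] at h1 ⊢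
    cases hs : nodeStepB node c1 with
    | inl c' => rw [hs] at h1; exact ih c' h1
    | inr r => rw [hs] at h1; exact absurd h1 (by simp)

theorem pv_iter_one (node : List Int)
    (c1 c2 : Int × Option Int × List (Int × Int × List Int))
    (h : nodeStepB node c1 = Sum.inl c2) : nodeIterB node 1 c1 = Sum.inl c2 := by
  simp [nodeIterB, h]

theorem pv_run_of_iter (node : List Int) (k : Nat)
    (c1 c2 : Int × Option Int × List (Int × Int × List Int))
    (h : nodeIterB node k c1 = Sum.inl c2) (g : Nat) :
    nodeRunB node (k + g) c1 = nodeRunB node g c2 := by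
  induction k generalizing c1 with
  | zero =>
    simp only [nodeIterB, Sum.inl.injEq] at h
    subst h; simp
  | succ k ih =>
    rw [Nat.succ_add]
    simp only [nodeIterB] at h
    simp only [nodeRunB]
    cases hs : nodeStepB node c1 with
    | inl c' => rw [hs] at h; exact ih c' h
    | inr r => rw [hs] at h; exact absurd h (by simp)

theorem pv_run_final (node : List Int) (g : Nat) (pos v : Int) :
    nodeRunB node (g + 1) (pos, some v, []) = (pos, v) := by
  simp [nodeRunB, nodeStepB]

-- proof-only view of the parser's children loop, one child at a time
def nodeGetValueParseC (f k : Nat) (node : List Int) (i : Int) : Option Int :=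
  (fun acc => acc.bind (nodeGetValueParseN f node))^[k] (some i)

theorem pv_iterate_none (g : Int → Option Int) (k : Nat) :
    (fun acc => Option.bind acc g)^[k] none = none := by
  induction k with
  | zero => rfl
  | succ k ih => rw [Function.iterate_succ_apply]; exact ih

theorem pv_parseC_succ (f k : Nat) (node : List Int) (i : Int) :
    nodeGetValueParseC f (k+1) node i =
      (nodeGetValueParseN f node i).bind (nodeGetValueParseC f k node) := by
  unfold nodeGetValueParseC
  rw [Function.iterate_succ_apply]
  cases h : nodeGetValueParseN f node i with
  | none => simp [h, pv_iterate_none]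
  | some j => simp [h]

-- A's `for m in md: if m <= c: v += vals[m-1]` equals B's sum over the filtered map.
theorem pv_fold_if_filter (p : Int → Prop) [DecidablePred p] (g : Int → Int) :
    ∀ (l : List Int) (acc : Int),
      l.foldl (fun a m => if p m then a + g m else a) acc =
        ((l.filter (fun m => decide (p m))).map g).foldl (· + ·) acc := by
  intro l
  induction l with
  | nil => intro acc; rfl
  | cons x xs ih =>
    intro acc
    by_cases hx : p x <;> simp [List.foldl, List.filter, hx, ih]

theorem pv_drop_drop (node : List Int) (p ci : Int) (hp : 0 ≤ p) (hci : 0 ≤ ci) :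
    (node.drop p.toNat).drop ci.toNat = node.drop (p + ci).toNat := by
  rw [List.drop_drop]
  congr 1
  omega

theorem pv_slice_drop (node : List Int) (i a n : Int)
    (hi : 0 ≤ i) (ha : 0 ≤ a) (hn : 0 ≤ n) :
    PySem.List.slice (node.drop i.toNat) (some a) (some (a + n)) =
      PySem.List.slice node (some (i + a)) (some (i + a + n)) := by
  rw [PySem.List.slice_toNat _ ha (by omega), PySem.List.slice_toNat _ (by omega) (by omega),
      pv_drop_drop node i a hi ha]
  congr 1
  omega

-- the metadata slice seen by A (relative to the node's own suffix) equals B's global one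
-- whenever the count is ≥ -2 (both sides empty for -2 ≤ n < 0) or the node is the top one.
theorem pv_md_slice (node : List Int) (i a n : Int) (hi : 0 ≤ i) (ha : 2 ≤ a)
    (hg : -2 ≤ n ∨ i = 0) :
    PySem.List.slice (node.drop i.toNat) (some a) (some (a + n)) =
      PySem.List.slice node (some (i + a)) (some (i + a + n)) := by
  by_cases hn : 0 ≤ n
  · exact pv_slice_drop node i a n hi (by omega) hn
  · rcases hg with hg | hg
    · rw [PySem.List.slice_toNat _ (by omega : (0:Int) ≤ a) (by omega),
          PySem.List.slice_toNat _ (by omega : (0:Int) ≤ i + a) (by omega)]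
      rw [show (a + n).toNat - a.toNat = 0 by omega,
          show (i + a + n).toNat - (i + a).toNat = 0 by omega]
      simp
    · subst hg
      simp

theorem pv_pyGet?_drop (node : List Int) (i a : Int) (hi : 0 ≤ i) (ha : 0 ≤ a) :
    PySem.List.pyGet? (node.drop i.toNat) a = PySem.List.pyGet? node (i + a) := by
  rw [PySem.List.pyGet?_of_nonneg _ ha, PySem.List.pyGet?_of_nonneg _ (by omega : (0:Int) ≤ i + a)]
  rw [List.getElem?_drop]
  congr 1
  omega

-- The joint invariant. pvMN f: if the parser (fuel f) accepts a node at position i,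
-- then A run on the suffix node.drop i.toNat consumes exactly j - i elements, and B's
-- machine, started at pointer i in "read header" mode over ANY stack s, reaches in k
-- steps (k + 1 ≤ (len+2)^f) the configuration (j, some <A's value>, s).
def pvMN (f : Nat) : Prop :=
  ∀ (node : List Int) (i j : Int), 0 ≤ i → nodeGetValueParseN f node i = some j →
    (0 < i → i ≤ j) ∧ (nodeGetValueGoA f (node.drop i.toNat)).1 = j - i ∧
    ∀ s : List (Int × Int × List Int), ∃ k : Nat,
      nodeIterB node k (i, none, s) =
        Sum.inl (j, some (nodeGetValueGoA f (node.drop i.toNat)).2, s) ∧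
      k + 1 ≤ (node.length + 2) ^ f

-- pvMC f: the children loop: parsing kc consecutive subtrees from i to j yields the list
-- cvs of their A-values; A's loop appends cvs, and B's machine, run with a top frame
-- still expecting exactly kc values, delivers all but the last into the frame and stops
-- holding the last one, at position j.
def pvMC (f : Nat) : Prop :=
  ∀ (kc : Nat) (node : List Int) (i j : Int), 0 < i →
    nodeGetValueParseC f kc node i = some j →
    i ≤ j ∧ ∃ cvs : List Int, cvs.length = kc ∧
      (∀ (p ci : Int) (avs : List Int), 0 ≤ p → 0 ≤ ci → p + ci = i →
        nodeGetValueLoopA f kc (node.drop p.toNat) ci avs = (ci + (j - i), avs ++ cvs)) ∧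
      (kc ≠ 0 → ∀ (c n : Int) (vals : List Int) (s : List (Int × Int × List Int)),
        (vals.length : Int) + (kc : Int) = c →
        ∃ (pre : List Int) (lv : Int) (k : Nat),
          cvs = pre ++ [lv] ∧
          nodeIterB node k (i, none, (c, n, vals) :: s) =
            Sum.inl (j, some lv, (c, n, vals ++ pre) :: s) ∧
          k + 1 ≤ kc * (node.length + 2) ^ f)

theorem pv_stepN (f : Nat) (hC : pvMC f) : pvMN (f + 1) := by
  intro node i j hi hparse
  have h0 : PySem.List.pyGet? (node.drop i.toNat) 0 = PySem.List.pyGet? node i := by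
    have := pv_pyGet?_drop node i 0 hi (by omega); simpa using this
  have h1 : PySem.List.pyGet? (node.drop i.toNat) 1 = PySem.List.pyGet? node (i + 1) := by
    exact pv_pyGet?_drop node i 1 hi (by omega)
  simp only [nodeGetValueParseN] at hparse
  cases hc : PySem.List.pyGet? node i with
  | none => rw [hc] at hparse; exact absurd hparse (by simp)
  | some c =>
    cases hn : PySem.List.pyGet? node (i + 1) with
    | none => rw [hc, hn] at hparse; exact absurd hparse (by simp)
    | some n =>
      rw [hc, hn] at hparse
      simp only [Option.bind_some] at hparse
      by_cases hnn : -2 ≤ n ∨ i = 0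
      · rw [if_pos hnn] at hparse
        by_cases hcc : 0 < c
        · -- node with children
          rw [if_pos hcc] at hparse
          by_cases hcl : c ≤ (node.length : Int)
          case neg => rw [if_neg hcl] at hparse; exact absurd hparse (by simp)
          rw [if_pos hcl] at hparse
          rw [show (fun acc => acc.bind (nodeGetValueParseN f node))^[c.toNat] (some (i + 2))
                = nodeGetValueParseC f c.toNat node (i + 2) from rfl] at hparse
          cases hch : nodeGetValueParseC f c.toNat node (i + 2) with
          | none => rw [hch] at hparse; exact absurd hparse (by simp)
          | some j0 =>
            rw [hch] at hparse
            simp only [Option.bind_some] at hparse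
            by_cases hall : (PySem.List.slice node (some j0) (some (j0 + n))).all
                (fun m => decide (-c < m)) = true
            · rw [if_pos hall] at hparse
              have hj : j = j0 + n := by
                simp only [Option.some.injEq] at hparse; omega
              obtain ⟨hij0, cvs, hlen, hAc, hM⟩ := hC c.toNat node (i + 2) j0 (by omega) hch
              have hr := hAc i 2 [] hi (by omega) (by ring)
              -- A's value
              simp only [nodeGetValueGoA, h0, hc, h1, hn, Option.getD_some, if_pos hcc]
              rw [hr]
              have hciA : (2 : Int) + (j0 - (i + 2)) = j0 - i := by ring
              rw [hciA]
              have hslice :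
                  PySem.List.slice (node.drop i.toNat) (some (j0 - i)) (some (j0 - i + n)) =
                    PySem.List.slice node (some j0) (some (j0 + n)) := by
                rw [pv_md_slice node i (j0 - i) n hi (by omega) hnn]
                congr 2 <;> ring
              rw [hslice]
              refine ⟨by intro hip; rcases hnn with h | h <;> omega, by omega, ?_⟩
              -- B's machine
              intro s
              have hkc0 : c.toNat ≠ 0 := by omega
              obtain ⟨pre, lv, k1, hcvs, hiter, hk1⟩ :=
                hM hkc0 c n [] s (by simp; omega)
              have hstep1 : nodeStepB node (i, none, s) =
                  Sum.inl (i + 2, none, (c, n, []) :: s) := by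
                simp [nodeStepB, hc, hn, if_pos hcc]
              have hlenpre : ((pre ++ [lv]).length : Int) = c := by
                rw [← hcvs, hlen]; omega
              have hstep2 : nodeStepB node (j0, some lv, (c, n, pre) :: s) =
                  Sum.inl (j0 + n,
                    some ((((PySem.List.slice node (some j0) (some (j0 + n))).filter
                        (fun m => decide (m ≤ c))).map
                        (fun m => (PySem.List.pyGet? (pre ++ [lv]) (m - 1)).getD 0)).foldl
                        (· + ·) 0),
                    s) := by
                simp only [nodeStepB]
                rw [if_neg (by omega)]
              have htot : nodeIterB node (1 + k1 + 1) (i, none, s) =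
                  Sum.inl (j0 + n,
                    some ((((PySem.List.slice node (some j0) (some (j0 + n))).filter
                        (fun m => decide (m ≤ c))).map
                        (fun m => (PySem.List.pyGet? (pre ++ [lv]) (m - 1)).getD 0)).foldl
                        (· + ·) 0),
                    s) := by
                refine pv_iter_trans node (1 + k1) 1 _ _ _
                  (pv_iter_trans node 1 k1 _ _ _ (pv_iter_one node _ _ hstep1) (by simpa using hiter))
                  (pv_iter_one node _ _ hstep2)
              refine ⟨1 + k1 + 1, ?_, ?_⟩
              · rw [htot, hj, ← hcvs]
                congr 2
                have hsnd : (j0 - i, ([] : List Int) ++ cvs).2 = cvs := rfl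
                rw [hsnd, pv_fold_if_filter (fun m => m ≤ c)
                      (fun m => (PySem.List.pyGet? cvs (m - 1)).getD 0)]
              · have hL : c.toNat ≤ node.length := by omega
                have hp1 : (1:Nat) ≤ (node.length + 2) ^ f := Nat.one_le_pow _ _ (by omega)
                have : k1 + 1 ≤ c.toNat * (node.length + 2) ^ f := hk1
                calc 1 + k1 + 1 + 1 = (k1 + 1) + 2 := by omega
                  _ ≤ c.toNat * (node.length + 2) ^ f + 2 := by omega
                  _ ≤ node.length * (node.length + 2) ^ f + 2 :=
                      by have := Nat.mul_le_mul_right ((node.length + 2) ^ f) hL; omega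
                  _ ≤ (node.length + 2) ^ (f + 1) := by
                      rw [pow_succ]
                      nlinarith [hp1]
            · rw [if_neg hall] at hparse; exact absurd hparse (by simp)
        · -- leaf
          rw [if_neg hcc] at hparse
          have hj : j = i + 2 + n := by
            simp only [Option.some.injEq] at hparse; omega
          simp only [nodeGetValueGoA, h0, hc, h1, hn, Option.getD_some, if_neg hcc]
          have hslice :
              PySem.List.slice (node.drop i.toNat) (some 2) (some (2 + n)) =
                PySem.List.slice node (some (i + 2)) (some (i + 2 + n)) :=
            pv_md_slice node i 2 n hi (by omega) hnn
          rw [hslice]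
          refine ⟨by intro hip; rcases hnn with h | h <;> omega, by omega, ?_⟩
          intro s
          refine ⟨1, ?_, ?_⟩
          · have hstep : nodeStepB node (i, none, s) =
                Sum.inl (i + 2 + n,
                  some ((PySem.List.slice node (some (i + 2)) (some (i + 2 + n))).foldl
                    (· + ·) 0), s) := by
              simp [nodeStepB, hc, hn, if_neg hcc]
            rw [pv_iter_one node _ _ hstep, hj]
          · have : (2:Nat) ≤ (node.length + 2) ^ (f + 1) := by
              calc (2:Nat) ≤ node.length + 2 := by omega
                _ = (node.length + 2) ^ 1 := by ring
                _ ≤ (node.length + 2) ^ (f + 1) :=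
                    Nat.pow_le_pow_right (by omega) (by omega)
            omega
      · rw [if_neg hnn] at hparse; exact absurd hparse (by simp)

theorem pv_stepC (f : Nat) (hN : pvMN f) : pvMC f := by
  intro kc
  induction kc with
  | zero =>
    intro node i j hi hparse
    simp only [nodeGetValueParseC, Function.iterate_zero, id_eq, Option.some.injEq] at hparse
    subst hparse
    refine ⟨le_refl _, [], rfl, ?_, by intro h; exact absurd rfl h⟩
    intro p ci avs hp hci hpci
    simp [nodeGetValueLoopA]
  | succ kc ih =>
    intro node i j hi hparse
    rw [pv_parseC_succ] at hparse
    cases h1 : nodeGetValueParseN f node i with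
    | none => rw [h1] at hparse; exact absurd hparse (by simp)
    | some j1 =>
      rw [h1] at hparse
      simp only [Option.bind_some] at hparse
      obtain ⟨hij1, hA1, hM1⟩ := hN node i j1 (by omega) h1
      have hij1' : i ≤ j1 := hij1 hi
      obtain ⟨hj1j, cvsr, hlenr, hAr, hMr⟩ := ih node j1 j (by omega) hparse
      set v1 := (nodeGetValueGoA f (node.drop i.toNat)).2 with hv1
      refine ⟨by omega, v1 :: cvsr, by simpa using hlenr, ?_, ?_⟩
      · -- A's loop
        intro p ci avs hp hci hpci
        have hdrop : PySem.List.slice (node.drop p.toNat) (some ci) none =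
            node.drop i.toNat := by
          rw [PySem.List.slice_from _ hci, pv_drop_drop node p ci hp hci, hpci]
        simp only [nodeGetValueLoopA, hdrop]
        rw [← hv1, hA1]
        have := hAr p (ci + (j1 - i)) (avs ++ [v1]) hp (by omega) (by omega)
        rw [this, Prod.mk.injEq]
        exact ⟨by ring, by simp⟩
      · -- B's machine
        intro _ c n vals s hbal
        obtain ⟨k1, hiter1, hk1⟩ := hM1 ((c, n, vals) :: s)
        by_cases hkc : kc = 0
        · -- v1 is the last child: stop holding it
          subst hkc
          have hjj : j = j1 ∧ cvsr = [] := by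
            have h := hAr 0 j1 [] (by omega) (by omega) (by omega)
            simp only [nodeGetValueLoopA] at h
            have h1' := congrArg Prod.fst h
            have h2' := congrArg Prod.snd h
            simp only at h1' h2'
            constructor
            · omega
            · exact (List.self_eq_append_right.mp h2')
          refine ⟨[], v1, k1, by simp [hjj.2], ?_, by simpa using hk1⟩
          rw [hjj.1] at *
          simpa using hiter1
        · -- deliver v1 into the frame, then continue with the remaining kc children
          have hstep : nodeStepB node (j1, some v1, (c, n, vals) :: s) =
              Sum.inl (j1, none, (c, n, vals ++ [v1]) :: s) := by
            simp only [nodeStepB]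
            rw [if_pos (by simp; omega)]
          obtain ⟨prer, lv, kr, hcvsr, hiterr, hkr⟩ :=
            hMr hkc c n (vals ++ [v1]) s (by simp; push_cast at hbal; omega)
          refine ⟨v1 :: prer, lv, k1 + 1 + kr, by simp [hcvsr], ?_, ?_⟩
          · have := pv_iter_trans node (k1 + 1) kr _ _ _
              (pv_iter_trans node k1 1 _ _ _ hiter1 (pv_iter_one node _ _ hstep)) hiterr
            simpa using this
          · have hp1 : (1:Nat) ≤ (node.length + 2) ^ f := Nat.one_le_pow _ _ (by omega)
            calc k1 + 1 + kr + 1 = (k1 + 1) + (kr + 1) := by omega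
              _ ≤ (node.length + 2) ^ f + kc * (node.length + 2) ^ f := by omega
              _ = (kc + 1) * (node.length + 2) ^ f := by ring

theorem pv_main (f : Nat) : pvMN f ∧ pvMC f := by
  induction f with
  | zero =>
    have hN0 : pvMN 0 := by
      intro node i j hi hparse
      simp [nodeGetValueParseN] at hparse
    exact ⟨hN0, pv_stepC 0 hN0⟩
  | succ f ih =>
    have hN := pv_stepN f (pv_stepC f ih.1)
    exact ⟨hN, pv_stepC (f + 1) hN⟩

-- ===== VERDICT (by name: the statement is the Claim_ definition above) =====
theorem nodeGetValue_spec : Claim_equal_nodeGetValue := by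
  intro node _hdom hpre
  unfold Spec_nodeGetValue nodeGetValue nodeGetValue_alt
  unfold Pre_nodeGetValue at hpre
  cases hj : nodeGetValueParseN (node.length + 1) node 0 with
  | none => rw [hj] at hpre; simp at hpre
  | some j =>
    obtain ⟨_, hA1, hM⟩ := (pv_main (node.length + 1)).1 node 0 j (le_refl 0) hj
    obtain ⟨k, hiter, hk⟩ := hM []
    simp only [Int.toNat_zero, List.drop_zero] at hA1 hiter
    have hfu : k + 1 ≤ (node.length + 2) ^ (node.length + 1) := hk
    obtain ⟨g, hg⟩ : ∃ g, (node.length + 2) ^ (node.length + 1) = k + (g + 1) :=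
      ⟨(node.length + 2) ^ (node.length + 1) - k - 1, by omega⟩
    rw [hg, pv_run_of_iter node k _ _ hiter (g + 1), pv_run_final]
    rw [Prod.ext_iff]
    exact ⟨by simp; omega, rfl⟩
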